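-- pv_equiv track=rewrite | github.com/hitaxim/leetcode-learnings | interview-prep/Sum of Total Strength of Wizards.py | totalStrength
-- ===== SOURCE A (Python) =====
-- from typing import List
--
-- def totalStrength(strength: List[int]) -> int:
--     n = len(strength)
--     nums = strength.copy()
--     stack = []
--
--     pref = []
--
--     dp = [0]*n
--     for i in range(n):
--         pref.append((pref[-1] if pref else 0) + nums[i])
--
--     sm = 0
--
--     prefSum = [0]*n
--     ans = 0
--     for i in range(n):
--         prefSum[i] = (i+1)*nums[i] + (prefSum[i-1] if i > 0 else 0)
--         while stack and stack[-1][0] >= nums[i]: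
--             x = stack.pop()
--             sm -= x[1]
--         if stack:
--             ind = stack[-1][2]
--             val = dp[ind] + (pref[i] - pref[ind])*sm
--             val += (prefSum[i] - prefSum[ind] - (ind+1)*(pref[i] - pref[ind]))*nums[i]
--             dp[i] = val
--             ans += val
--             stack.append((nums[i], (i-ind)*nums[i], i))
--             sm += (i-ind)*nums[i]
--         else:
--             ans += prefSum[i]*nums[i]
--             dp[i] = prefSum[i]*nums[i]
--             stack.append((nums[i], (i+1)*nums[i], i))
--             sm += (i+1)*nums[i]
--     return ans % (10**9 + 7)
-- ===== SOURCE B (Python) =====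
-- def totalStrength(strength):
--     # Sum over all subarrays of min(subarray) * sum(subarray), brute force:
--     # for each left endpoint keep a running minimum and running sum.
--     n = len(strength)
--     total = 0
--     for i in range(n):
--         cur_min = strength[i]
--         cur_sum = 0
--         for j in range(i, n):
--             cur_min = min(cur_min, strength[j])
--             cur_sum += strength[j]
--             total += cur_min * cur_sum
--     return total % (10**9 + 7)
-- ===== Notes on version B (the rewrite author's own statement) =====
-- stated objective: simpler
-- what changed: Replaced the monotonic-stack DP (stack of weighted minima segments, dp/prefSum/pref arrays and a running segment-minima sum) by a direct two-loop enumeration of all subarrays with a running minimum and running sum per left endpoint.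
import Mathlib
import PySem

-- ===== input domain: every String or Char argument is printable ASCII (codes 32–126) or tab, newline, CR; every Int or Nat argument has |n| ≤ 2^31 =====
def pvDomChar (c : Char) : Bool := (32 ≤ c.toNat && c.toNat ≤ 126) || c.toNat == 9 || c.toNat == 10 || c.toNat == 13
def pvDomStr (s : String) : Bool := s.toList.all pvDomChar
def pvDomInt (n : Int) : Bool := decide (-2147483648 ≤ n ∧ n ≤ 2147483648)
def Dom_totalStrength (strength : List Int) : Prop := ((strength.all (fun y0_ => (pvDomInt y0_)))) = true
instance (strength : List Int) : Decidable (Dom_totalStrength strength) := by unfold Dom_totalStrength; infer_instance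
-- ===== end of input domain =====

-- B replaces A's monotonic-stack DP by a direct two-loop enumeration of all subarrays
-- (running minimum and running sum per left endpoint): simpler, not faster.

-- ===== PORT A =====
-- Python's stack list is modelled with its TOP at the HEAD of the Lean list
-- (Python append / pop / stack[-1] at the right end become cons / tail / head).
def popA (v : Int) : List (Int × Int × Nat) → Int → List (Int × Int × Nat) × Int
  | [], sm => ([], sm)
  | (a, b, c) :: rest, sm =>
      if a ≥ v then popA v rest (sm - b) else ((a, b, c) :: rest, sm)

def stepA (nums pref : List Int) (st : List (Int × Int × Nat) × Int × List Int × List Int × Int)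
    (i : Nat) : List (Int × Int × Nat) × Int × List Int × List Int × Int :=
  let (stack, sm, prefSum, dp, ans) := st
  let prefSum := prefSum.set i (((i : Int) + 1) * nums.getD i 0 +
      (if 0 < i then prefSum.getD (i - 1) 0 else 0))
  let (stack, sm) := popA (nums.getD i 0) stack sm
  match stack with
  | (_, _, ind) :: _ =>
      let val := dp.getD ind 0 + (pref.getD i 0 - pref.getD ind 0) * sm
      let val := val + (prefSum.getD i 0 - prefSum.getD ind 0 -
          ((ind : Int) + 1) * (pref.getD i 0 - pref.getD ind 0)) * nums.getD i 0
      ((nums.getD i 0, ((i : Int) - (ind : Int)) * nums.getD i 0, i) :: stack,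
        sm + ((i : Int) - (ind : Int)) * nums.getD i 0, prefSum, dp.set i val, ans + val)
  | [] =>
      let val := prefSum.getD i 0 * nums.getD i 0
      ([(nums.getD i 0, ((i : Int) + 1) * nums.getD i 0, i)],
        sm + ((i : Int) + 1) * nums.getD i 0, prefSum, dp.set i val, ans + val)

def totalStrength (strength : List Int) : Int :=
  let n := strength.length
  let nums := strength
  let pref := (List.range n).foldl (fun pref i => pref ++ [pref.getLastD 0 + nums.getD i 0]) []
  let st := (List.range n).foldl (stepA nums pref) ([], 0, List.replicate n 0, List.replicate n 0, 0)
  PySem.Int.mod st.2.2.2.2 (10 ^ 9 + 7)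

-- ===== PORT B =====
def innerB (strength : List Int) (n i : Nat) (total : Int) : Int :=
  ((List.range' i (n - i)).foldl
    (fun (st : Int × Int × Int) j =>
      let (total, curMin, curSum) := st
      let curMin := min curMin (strength.getD j 0)
      let curSum := curSum + strength.getD j 0
      (total + curMin * curSum, curMin, curSum))
    (total, strength.getD i 0, 0)).1

def totalStrength_alt (strength : List Int) : Int :=
  let n := strength.length
  let total := (List.range n).foldl (fun total i => innerB strength n i total) 0
  PySem.Int.mod total (10 ^ 9 + 7)

-- ===== PRECONDITION & SPEC =====
def Spec_totalStrength (strength : List Int) (out : Int) : Prop := out = totalStrength_alt strength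
instance (strength : List Int) (out : Int) : Decidable (Spec_totalStrength strength out) := by unfold Spec_totalStrength; infer_instance

-- ===== CLAIM (what is proved, stated in full; the proofs are below) =====
def Claim_equal_totalStrength : Prop := ∀ (strength : List Int), Dom_totalStrength strength → Spec_totalStrength strength (totalStrength strength)

-- ===== LEMMAS AND PROOFS =====

-- The mathematical reading of both programs: pvg = element, pvP = prefix sums,
-- pvmn j i = min of nums[j..i], pvdp t = Σ_{j≤t} min·sum of subarrays ending at t.
def pvg (nums : List Int) (t : Nat) : Int := nums.getD t 0

def pvP (nums : List Int) : Nat → Int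
  | 0 => 0
  | k + 1 => pvP nums k + pvg nums k

def pvmn (nums : List Int) (j i : Nat) : Int :=
  (List.range' (j + 1) (i - j)).foldl (fun m u => min m (pvg nums u)) (pvg nums j)

def pvdp (nums : List Int) (t : Nat) : Int :=
  ∑ j ∈ Finset.range (t + 1), pvmn nums j t * (pvP nums (t + 1) - pvP nums j)

def pvans (nums : List Int) (k : Nat) : Int := ∑ t ∈ Finset.range k, pvdp nums t

def pvps (nums : List Int) (t : Nat) : Int :=
  ∑ j ∈ Finset.range (t + 1), ((j : Int) + 1) * pvg nums j

def pvsm (nums : List Int) : Nat → Int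
  | 0 => 0
  | m + 1 => ∑ j ∈ Finset.range (m + 1), pvmn nums j m

def pvKeep (nums : List Int) (k t : Nat) : Bool := decide (pvg nums k ≤ pvg nums t)

-- indices on A's stack after k loop iterations, top first
def sIdx (nums : List Int) : Nat → List Nat
  | 0 => []
  | k + 1 => k :: (sIdx nums k).dropWhile (pvKeep nums k)

def prevI : List Nat → Int
  | [] => -1
  | b :: _ => (b : Int)

def entriesW (nums : List Int) : List Nat → List (Int × Int × Nat)
  | [] => []
  | a :: r => (pvg nums a, ((a : Int) - prevI r) * pvg nums a, a) :: entriesW nums r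

def wsumW (nums : List Int) : List Nat → Int
  | [] => 0
  | a :: r => ((a : Int) - prevI r) * pvg nums a + wsumW nums r

def lbOf : List Nat → Nat
  | [] => 0
  | b :: _ => b + 1

def pvcov (nums : List Int) (m : Nat) : List Nat → Prop
  | [] => True
  | a :: r => (∀ j, lbOf r ≤ j → j ≤ a → pvmn nums j m = pvg nums a) ∧ pvcov nums m r

def arrOf (f : Nat → Int) (k n : Nat) : List Int :=
  (List.range n).map fun t => if t < k then f t else 0

-- basic facts
theorem pvP_eq_sum (nums : List Int) (m : Nat) :
    pvP nums m = ∑ j ∈ Finset.range m, pvg nums j := by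
  induction m with
  | zero => simp [pvP]
  | succ k ih => simp [pvP, ih, Finset.sum_range_succ]

theorem mn_self (nums : List Int) (j : Nat) : pvmn nums j j = pvg nums j := by
  simp [pvmn]

theorem mn_succ (nums : List Int) {j i : Nat} (h : j ≤ i) :
    pvmn nums j (i + 1) = min (pvmn nums j i) (pvg nums (i + 1)) := by
  have h1 : i + 1 - j = (i - j) + 1 := by omega
  rw [pvmn, pvmn, h1, List.range'_1_concat, List.foldl_append]
  have h2 : j + 1 + (i - j) = i + 1 := by omega
  rw [h2]
  rfl

theorem mn_endpoint (nums : List Int) {j u : Nat} (h : j ≤ u) : pvmn nums j u ≤ pvg nums u := by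
  rcases Nat.eq_or_lt_of_le h with h' | h'
  · rw [← h', mn_self]
  · obtain ⟨w, rfl⟩ : ∃ w, u = w + 1 := ⟨u - 1, by omega⟩
    rw [mn_succ nums (show j ≤ w by omega)]
    exact min_le_right _ _

theorem mn_anti (nums : List Int) {j u : Nat} (h1 : j ≤ u) : ∀ i, u ≤ i → pvmn nums j i ≤ pvmn nums j u := by
  intro i
  induction i with
  | zero => intro h; interval_cases u; exact le_refl _
  | succ w ih =>
    intro h
    rcases Nat.eq_or_lt_of_le h with h' | h'
    · rw [h']
    · calc pvmn nums j (w + 1) ≤ pvmn nums j w := by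
            rw [mn_succ nums (show j ≤ w by omega)]; exact min_le_left _ _
        _ ≤ pvmn nums j u := ih (by omega)

theorem mn_le_g (nums : List Int) {j u i : Nat} (h1 : j ≤ u) (h2 : u ≤ i) :
    pvmn nums j i ≤ pvg nums u :=
  le_trans (mn_anti nums h1 i h2) (mn_endpoint nums h1)

theorem mn_stable (nums : List Int) {j d i : Nat} (h1 : j ≤ d) (h2 : d ≤ i)
    (h : ∀ u, d < u → u ≤ i → pvg nums d < pvg nums u) :
    pvmn nums j i = pvmn nums j d := by
  induction i, h2 using Nat.le_induction with
  | base => rfl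
  | succ i hdi ih =>
    rw [mn_succ nums (show j ≤ i by omega), ih (fun u hu1 hu2 => h u hu1 (by omega))]
    exact min_eq_left (le_trans (mn_le_g nums h1 (le_refl d))
      (le_of_lt (h (i + 1) (by omega) (le_refl _))))

-- stack-shape facts
theorem sIdx_lt (nums : List Int) : ∀ (k : Nat), ∀ t ∈ sIdx nums k, t < k := by
  intro k
  induction k with
  | zero => intro t ht; simp [sIdx] at ht
  | succ m ih =>
    intro t ht
    rcases List.mem_cons.mp ht with rfl | ht
    · omega
    · exact lt_trans (ih t ((List.dropWhile_sublist _).subset ht)) (by omega)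

theorem sIdx_pairwise (nums : List Int) : ∀ (k : Nat), (sIdx nums k).Pairwise (· > ·) := by
  intro k
  induction k with
  | zero => exact List.Pairwise.nil
  | succ m ih =>
    refine List.pairwise_cons.mpr ⟨?_, ih.sublist (List.dropWhile_sublist _)⟩
    intro t ht
    exact sIdx_lt nums m t ((List.dropWhile_sublist _).subset ht)

theorem kept_lt_of (nums : List Int) (k : Nat)
    (hprop : ∀ t ∈ sIdx nums k, ∀ u, t < u → u < k → pvg nums t < pvg nums u) :
    ∀ t ∈ (sIdx nums k).dropWhile (pvKeep nums k), pvg nums t < pvg nums k := by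
  intro t ht
  cases hd : (sIdx nums k).dropWhile (pvKeep nums k) with
  | nil => rw [hd] at ht; simp at ht
  | cons h0 tail =>
    have hne : (sIdx nums k).dropWhile (pvKeep nums k) ≠ [] := by rw [hd]; simp
    have hh : pvKeep nums k ((((sIdx nums k).dropWhile (pvKeep nums k))).head hne) = false :=
      List.head_dropWhile_not (pvKeep nums k) hne
    have hh0 : pvg nums h0 < pvg nums k := by
      revert hh
      simp only [hd, List.head_cons, pvKeep, decide_eq_false_iff_not, not_le]
      exact id
    rw [hd] at ht
    rcases List.mem_cons.mp ht with rfl | ht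
    · exact hh0
    · have hsub : List.Sublist (h0 :: tail) (sIdx nums k) := by
        rw [← hd]; exact List.dropWhile_sublist (pvKeep nums k)
      have hpw := (sIdx_pairwise nums k).sublist hsub
      have hgt : h0 > t := (List.pairwise_cons.mp hpw).1 t ht
      have hmem0 : h0 ∈ sIdx nums k := (List.dropWhile_sublist _).subset (by rw [hd]; simp)
      have hmemt : t ∈ sIdx nums k := (List.dropWhile_sublist _).subset (by rw [hd]; exact List.mem_cons_of_mem _ ht)
      exact lt_trans (hprop t hmemt h0 hgt (sIdx_lt nums k h0 hmem0)) hh0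

theorem sIdx_prop (nums : List Int) : ∀ (k : Nat),
    ∀ t ∈ sIdx nums k, ∀ u, t < u → u < k → pvg nums t < pvg nums u := by
  intro k
  induction k with
  | zero => intro t ht; simp [sIdx] at ht
  | succ m ih =>
    intro t ht u htu hu
    rcases List.mem_cons.mp ht with rfl | ht
    · omega
    · rcases Nat.lt_succ_iff_lt_or_eq.mp hu with hu' | rfl
      · exact ih t ((List.dropWhile_sublist _).subset ht) u htu hu'
      · exact kept_lt_of nums u ih t ht

theorem kept_lt (nums : List Int) (k : Nat) :
    ∀ t ∈ (sIdx nums k).dropWhile (pvKeep nums k), pvg nums t < pvg nums k :=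
  kept_lt_of nums k (sIdx_prop nums k)

theorem cov_dropWhile (nums : List Int) (m : Nat) (p : Nat → Bool) :
    ∀ L, pvcov nums m L → pvcov nums m (L.dropWhile p) := by
  intro L
  induction L with
  | nil => intro _; trivial
  | cons a r ih =>
    intro hc
    rw [List.dropWhile_cons]
    split
    · exact ih hc.2
    · exact hc

theorem cov_lookup (nums : List Int) (m : Nat) :
    ∀ L, pvcov nums m L → ∀ (h : L ≠ []) (j : Nat), j ≤ L.head h →
      ∃ a ∈ L, j ≤ a ∧ pvmn nums j m = pvg nums a := by
  intro L
  induction L with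
  | nil => intro _ h; exact absurd rfl h
  | cons a r ih =>
    intro hc _ j hj
    by_cases hlb : lbOf r ≤ j
    · exact ⟨a, List.mem_cons_self, hj, hc.1 j hlb hj⟩
    · cases r with
      | nil => exact absurd (Nat.zero_le j) hlb
      | cons b r' =>
        obtain ⟨a', ha', hja', hmn⟩ := ih hc.2 (by simp) j (by rw [List.head_cons]; simp [lbOf] at hlb; omega)
        exact ⟨a', List.mem_cons_of_mem _ ha', hja', hmn⟩

theorem cov_upgrade (nums : List Int) (m : Nat) :
    ∀ s, (∀ t ∈ s, pvg nums t < pvg nums (m + 1)) → (∀ t ∈ s, t ≤ m) →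
      pvcov nums m s → pvcov nums (m + 1) s := by
  intro s
  induction s with
  | nil => intro _ _ _; trivial
  | cons a r ih =>
    intro hlt hle hc
    refine ⟨?_, ih (fun t ht => hlt t (List.mem_cons_of_mem _ ht))
      (fun t ht => hle t (List.mem_cons_of_mem _ ht)) hc.2⟩
    intro j hj1 hj2
    have ha := hle a List.mem_cons_self
    rw [mn_succ nums (by omega), hc.1 j hj1 hj2]
    exact min_eq_left (le_of_lt (hlt a List.mem_cons_self))

theorem sIdx_cov (nums : List Int) : ∀ (k : Nat), pvcov nums k (sIdx nums (k + 1)) := by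
  intro k
  induction k with
  | zero =>
    refine ⟨?_, trivial⟩
    intro j _ hj2
    interval_cases j
    exact mn_self nums 0
  | succ m ih =>
    show pvcov nums (m + 1) ((m + 1) :: (sIdx nums (m + 1)).dropWhile (pvKeep nums (m + 1)))
    refine ⟨?_, cov_upgrade nums m _ (kept_lt nums (m + 1))
      (fun t ht => by
        have := sIdx_lt nums (m + 1) t ((List.dropWhile_sublist _).subset ht); omega)
      (cov_dropWhile nums m _ _ ih)⟩
    intro j hj1 hj2
    rcases Nat.eq_or_lt_of_le hj2 with rfl | hlt
    · exact mn_self nums (m + 1)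
    · have hjm : j ≤ m := by omega
      rw [mn_succ nums hjm]
      have hne : sIdx nums (m + 1) ≠ [] := by
        show m :: _ ≠ []; simp
      have hhead : (sIdx nums (m + 1)).head hne = m := rfl
      obtain ⟨a, haL, hja, hmn⟩ := cov_lookup nums m (sIdx nums (m + 1)) ih hne j (by rw [hhead]; exact hjm)
      have hkeep : pvKeep nums (m + 1) a = true := by
        have hsplit := List.takeWhile_append_dropWhile (p := pvKeep nums (m + 1)) (l := sIdx nums (m + 1))
        rw [← hsplit] at haL
        rcases List.mem_append.mp haL with hta | hda
        · exact List.mem_takeWhile_imp hta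
        · exfalso
          cases hcs : (sIdx nums (m + 1)).dropWhile (pvKeep nums (m + 1)) with
          | nil => rw [hcs] at hda; simp at hda
          | cons b tail =>
            rw [hcs] at hda hj1
            have hpws : (b :: tail).Pairwise (· > ·) :=
              (sIdx_pairwise nums (m + 1)).sublist (hcs ▸ List.dropWhile_sublist _)
            have hab : a ≤ b := by
              rcases List.mem_cons.mp hda with rfl | hda'
              · exact le_refl a
              · exact le_of_lt ((List.pairwise_cons.mp hpws).1 a hda')
            have hbj : b + 1 ≤ j := hj1
            omega
      have hga : pvg nums (m + 1) ≤ pvg nums a := by simpa [pvKeep] using hkeep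
      rw [hmn]
      exact min_eq_right hga

theorem wsumW_eq (nums : List Int) (m : Nat) :
    ∀ L, pvcov nums m L → L.Pairwise (· > ·) →
      wsumW nums L = ∑ j ∈ Finset.range (lbOf L), pvmn nums j m := by
  intro L
  induction L with
  | nil => intro _ _; simp [wsumW, lbOf]
  | cons a r ih =>
    intro hc hpw
    have hr := ih hc.2 (List.pairwise_cons.mp hpw).2
    have hlb : lbOf r ≤ a + 1 := by
      cases r with
      | nil => simp [lbOf]
      | cons b r' =>
        have : b < a := (List.pairwise_cons.mp hpw).1 b List.mem_cons_self
        simp only [lbOf]; omega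
    have hconst : ∑ j ∈ Finset.Ico (lbOf r) (a + 1), pvmn nums j m
        = ((a + 1 - lbOf r : Nat) : Int) * pvg nums a := by
      rw [Finset.sum_congr rfl (fun j hj => hc.1 j (Finset.mem_Ico.mp hj).1 (by
        have := (Finset.mem_Ico.mp hj).2; omega))]
      rw [Finset.sum_const, Nat.card_Ico, nsmul_eq_mul]
    have hcast : (a : Int) - prevI r = ((a + 1 - lbOf r : Nat) : Int) := by
      cases r with
      | nil => simp [prevI, lbOf]
      | cons b r' =>
        have : b < a := (List.pairwise_cons.mp hpw).1 b List.mem_cons_self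
        simp only [prevI, lbOf]
        omega
    show ((a : Int) - prevI r) * pvg nums a + wsumW nums r = ∑ j ∈ Finset.range (a + 1), pvmn nums j m
    rw [hr, Finset.range_eq_Ico, ← Finset.sum_Ico_consecutive _ (Nat.zero_le (lbOf r)) hlb,
      ← Finset.range_eq_Ico, hconst, hcast]
    ring

theorem popA_entries (nums : List Int) (k : Nat) :
    ∀ L sm, popA (pvg nums k) (entriesW nums L) sm =
      (entriesW nums (L.dropWhile (pvKeep nums k)),
       sm - (wsumW nums L - wsumW nums (L.dropWhile (pvKeep nums k)))) := by
  intro L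
  induction L with
  | nil => intro sm; simp [entriesW, popA, wsumW]
  | cons a r ih =>
    intro sm
    show popA (pvg nums k) ((pvg nums a, ((a : Int) - prevI r) * pvg nums a, a) :: entriesW nums r) sm = _
    rw [popA]
    by_cases h : pvg nums k ≤ pvg nums a
    · rw [if_pos (by exact h), ih, List.dropWhile_cons, if_pos (by simp [pvKeep, h])]
      refine Prod.ext rfl ?_
      show _ = sm - (wsumW nums (a :: r) - _)
      rw [wsumW]
      ring
    · rw [if_neg (by exact h), List.dropWhile_cons, if_neg (by simp [pvKeep, h])]
      refine Prod.ext rfl ?_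
      simp

theorem sm_eq_wsumW (nums : List Int) (k : Nat) : pvsm nums k = wsumW nums (sIdx nums k) := by
  cases k with
  | zero => rfl
  | succ m =>
    exact (wsumW_eq nums m (sIdx nums (m + 1)) (sIdx_cov nums m) (sIdx_pairwise nums (m + 1))).symm

-- array facts
theorem arrOf_getD (f : Nat → Int) {k n t : Nat} (h : t < n) :
    (arrOf f k n).getD t 0 = if t < k then f t else 0 := by
  rw [List.getD_eq_getElem?_getD, List.getElem?_eq_getElem (by simpa [arrOf] using h)]
  simp [arrOf]

theorem arrOf_set (f : Nat → Int) {k n : Nat} (hk : k < n) :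
    (arrOf f k n).set k (f k) = arrOf f (k + 1) n := by
  apply List.ext_getElem (by simp [arrOf])
  intro t h1 h2
  have htn : t < n := by simpa [arrOf] using h2
  by_cases ht : t = k
  · subst ht
    rw [List.getElem_set_self (by simpa [arrOf] using htn)]
    simp [arrOf]
  · rw [List.getElem_set_ne (by omega)]
    simp only [arrOf, List.getElem_map, List.getElem_range]
    have : t < k ↔ t < k + 1 := by omega
    simp [this]

theorem replicate_eq_arrOf (f : Nat → Int) (n : Nat) : List.replicate n (0 : Int) = arrOf f 0 n := by
  apply List.ext_getElem (by simp [arrOf])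
  intro t h1 h2
  simp [arrOf]

theorem pref_eq (nums : List Int) : ∀ k,
    (List.range k).foldl (fun pref i => pref ++ [pref.getLastD 0 + nums.getD i 0]) [] =
      (List.range k).map (fun t => pvP nums (t + 1)) := by
  intro k
  induction k with
  | zero => rfl
  | succ m ih =>
    rw [List.range_succ, List.foldl_append, ih, List.map_append]
    simp only [List.foldl_cons, List.foldl_nil, List.map_cons, List.map_nil]
    congr 2
    have hlast : (List.map (fun t => pvP nums (t + 1)) (List.range m)).getLastD 0 = pvP nums m := by
      cases m with
      | zero => rfl
      | succ w =>
        rw [List.range_succ, List.map_append]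
        exact List.getLastD_concat
    rw [hlast]
    rfl

-- sum manipulations
theorem sum_seg (nums : List Int) (l : Nat) : ∀ e, l ≤ e →
    ∑ j ∈ Finset.Ico l e, (pvP nums e - pvP nums j) =
      ∑ u ∈ Finset.Ico l e, ((u : Int) + 1 - l) * pvg nums u := by
  intro e he
  induction e, he using Nat.le_induction with
  | base => simp
  | succ e he ih =>
    rw [Finset.sum_Ico_succ_top (by omega), Finset.sum_Ico_succ_top (by omega)]
    have hP : pvP nums (e + 1) = pvP nums e + pvg nums e := rfl
    have hsum : ∑ j ∈ Finset.Ico l e, (pvP nums (e + 1) - pvP nums j)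
        = ∑ j ∈ Finset.Ico l e, ((pvP nums e - pvP nums j) + pvg nums e) := by
      refine Finset.sum_congr rfl (fun j _ => by rw [hP]; ring)
    rw [hsum, Finset.sum_add_distrib, ih, Finset.sum_const, Nat.card_Ico, nsmul_eq_mul, hP]
    have : ((e - l : Nat) : Int) = (e : Int) - l := by omega
    rw [this]
    ring

theorem dp_step_pos (nums : List Int) {ind k : Nat} (hik : ind < k)
    (hA : ∀ j, j ≤ ind → pvmn nums j k = pvmn nums j ind)
    (hB : ∀ j, ind < j → j ≤ k → pvmn nums j k = pvg nums k) :
    pvdp nums k = pvdp nums ind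
      + (pvP nums (k + 1) - pvP nums (ind + 1)) * (∑ j ∈ Finset.range (ind + 1), pvmn nums j k)
      + (pvps nums k - pvps nums ind - ((ind : Int) + 1) * (pvP nums (k + 1) - pvP nums (ind + 1))) * pvg nums k := by
  have hPdiff : pvP nums (k + 1) - pvP nums (ind + 1) = ∑ u ∈ Finset.Ico (ind + 1) (k + 1), pvg nums u := by
    rw [pvP_eq_sum, pvP_eq_sum, eq_comm, Finset.sum_Ico_eq_sub _ (by omega)]
  have hpsdiff : pvps nums k - pvps nums ind
      = ∑ u ∈ Finset.Ico (ind + 1) (k + 1), ((u : Int) + 1) * pvg nums u := by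
    unfold pvps
    rw [eq_comm, Finset.sum_Ico_eq_sub _ (by omega)]
  have h2 : ∑ j ∈ Finset.Ico (ind + 1) (k + 1), pvmn nums j k * (pvP nums (k + 1) - pvP nums j)
      = (pvps nums k - pvps nums ind - ((ind : Int) + 1) * (pvP nums (k + 1) - pvP nums (ind + 1))) * pvg nums k := by
    rw [Finset.sum_congr rfl (fun j hj => by
      rw [hB j (Finset.mem_Ico.mp hj).1 (by have := (Finset.mem_Ico.mp hj).2; omega)]),
      ← Finset.mul_sum, sum_seg nums (ind + 1) (k + 1) (by omega), hpsdiff, hPdiff,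
      Finset.mul_sum (a := (ind : Int) + 1), ← Finset.sum_sub_distrib, Finset.sum_mul,
      Finset.mul_sum]
    refine Finset.sum_congr rfl (fun u _ => by push_cast; ring)
  have h1 : ∑ j ∈ Finset.Ico 0 (ind + 1), pvmn nums j k * (pvP nums (k + 1) - pvP nums j)
      = pvdp nums ind + (pvP nums (k + 1) - pvP nums (ind + 1)) * (∑ j ∈ Finset.range (ind + 1), pvmn nums j k) := by
    rw [Finset.sum_congr rfl (fun j hj => show pvmn nums j k * (pvP nums (k + 1) - pvP nums j)
        = pvmn nums j ind * (pvP nums (ind + 1) - pvP nums j) + pvmn nums j k * (pvP nums (k + 1) - pvP nums (ind + 1)) by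
      rw [hA j (by have := (Finset.mem_Ico.mp hj).2; omega)]; ring)]
    rw [Finset.sum_add_distrib, ← Finset.range_eq_Ico]
    have hfold : ∑ j ∈ Finset.range (ind + 1), pvmn nums j k * (pvP nums (k + 1) - pvP nums (ind + 1))
        = (pvP nums (k + 1) - pvP nums (ind + 1)) * ∑ j ∈ Finset.range (ind + 1), pvmn nums j k := by
      rw [Finset.mul_sum]
      exact Finset.sum_congr rfl (fun j _ => by ring)
    rw [hfold]
    rfl
  have hsplit : pvdp nums k
      = ∑ j ∈ Finset.Ico 0 (ind + 1), pvmn nums j k * (pvP nums (k + 1) - pvP nums j)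
        + ∑ j ∈ Finset.Ico (ind + 1) (k + 1), pvmn nums j k * (pvP nums (k + 1) - pvP nums j) := by
    unfold pvdp
    rw [Finset.range_eq_Ico, ← Finset.sum_Ico_consecutive _ (Nat.zero_le (ind + 1)) (by omega : ind + 1 ≤ k + 1)]
  rw [hsplit, h1, h2]

theorem dp_step_zero (nums : List Int) {k : Nat}
    (hB : ∀ j, j ≤ k → pvmn nums j k = pvg nums k) :
    pvdp nums k = pvps nums k * pvg nums k := by
  unfold pvdp
  rw [Finset.sum_congr rfl (fun j hj => by
    rw [hB j (by have := Finset.mem_range.mp hj; omega)]), ← Finset.mul_sum,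
    Finset.range_eq_Ico, sum_seg nums 0 (k + 1) (by omega)]
  unfold pvps
  rw [Finset.range_eq_Ico, Finset.mul_sum, Finset.sum_mul]
  refine Finset.sum_congr rfl (fun u _ => by push_cast; ring)

theorem sm_step_pos (nums : List Int) {ind k : Nat} (hik : ind < k)
    (hB : ∀ j, ind < j → j ≤ k → pvmn nums j k = pvg nums k) :
    pvsm nums (k + 1) = (∑ j ∈ Finset.range (ind + 1), pvmn nums j k) + ((k : Int) - ind) * pvg nums k := by
  show ∑ j ∈ Finset.range (k + 1), pvmn nums j k = _
  rw [Finset.range_eq_Ico, ← Finset.sum_Ico_consecutive _ (Nat.zero_le (ind + 1)) (by omega : ind + 1 ≤ k + 1),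
    ← Finset.range_eq_Ico]
  congr 1
  rw [Finset.sum_congr rfl (fun j hj => by
    rw [hB j (Finset.mem_Ico.mp hj).1 (by have := (Finset.mem_Ico.mp hj).2; omega)]),
    Finset.sum_const, Nat.card_Ico, nsmul_eq_mul]
  have : ((k + 1 - (ind + 1) : Nat) : Int) = (k : Int) - ind := by omega
  rw [this]

theorem sm_step_zero (nums : List Int) {k : Nat}
    (hB : ∀ j, j ≤ k → pvmn nums j k = pvg nums k) :
    pvsm nums (k + 1) = ((k : Int) + 1) * pvg nums k := by
  show ∑ j ∈ Finset.range (k + 1), pvmn nums j k = _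
  rw [Finset.sum_congr rfl (fun j hj => by
    rw [hB j (by have := Finset.mem_range.mp hj; omega)]),
    Finset.sum_const, Finset.card_range, nsmul_eq_mul]
  push_cast
  ring

-- one iteration of A's main loop preserves the invariant
theorem stepA_eq (nums : List Int) (k : Nat) (hk : k < nums.length) :
    stepA nums ((List.range nums.length).map (fun t => pvP nums (t + 1)))
      (entriesW nums (sIdx nums k), pvsm nums k, arrOf (pvps nums) k nums.length,
       arrOf (pvdp nums) k nums.length, pvans nums k) k
    = (entriesW nums (sIdx nums (k + 1)), pvsm nums (k + 1),
       arrOf (pvps nums) (k + 1) nums.length, arrOf (pvdp nums) (k + 1) nums.length,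
       pvans nums (k + 1)) := by
  have hv : ((k : Int) + 1) * nums.getD k 0 +
      (if 0 < k then (arrOf (pvps nums) k nums.length).getD (k - 1) 0 else 0) = pvps nums k := by
    cases k with
    | zero =>
      simp [pvps, pvg]
    | succ m =>
      rw [if_pos (by omega)]
      have h0 : m + 1 - 1 = m := rfl
      rw [h0, arrOf_getD (pvps nums) (by omega), if_pos (by omega)]
      show (((m + 1 : Nat) : Int) + 1) * pvg nums (m + 1) + pvps nums m = pvps nums (m + 1)
      have h1 : pvps nums (m + 1) = pvps nums m + (((m + 1 : Nat) : Int) + 1) * pvg nums (m + 1) := by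
        unfold pvps
        rw [Finset.sum_range_succ]
      rw [h1]
      ring
  obtain ⟨hHead, hTail⟩ := sIdx_cov nums k
  have hpop := popA_entries nums k (sIdx nums k) (pvsm nums k)
  unfold stepA
  simp only [show nums.getD k 0 = pvg nums k from rfl] at hv ⊢
  rw [hv, arrOf_set (pvps nums) hk, hpop]
  cases hcs : (sIdx nums k).dropWhile (pvKeep nums k) with
  | nil =>
    rw [hcs] at hHead
    have hB : ∀ j, j ≤ k → pvmn nums j k = pvg nums k := fun j hj => hHead j (Nat.zero_le j) hj
    have hsidx : sIdx nums (k + 1) = [k] := by show k :: _ = _; rw [hcs]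
    have hval : (arrOf (pvps nums) (k + 1) nums.length).getD k 0 = pvps nums k := by
      rw [arrOf_getD (pvps nums) hk]; simp
    have hsm1 : pvsm nums k - (wsumW nums (sIdx nums k) - wsumW nums ([] : List Nat)) = 0 := by
      rw [sm_eq_wsumW]; show _ - (_ - 0) = _; ring
    simp only [entriesW, hsm1, hval]
    rw [← dp_step_zero nums hB, arrOf_set (pvdp nums) hk, hsidx,
      show pvans nums (k + 1) = pvans nums k + pvdp nums k from Finset.sum_range_succ _ _,
      sm_step_zero nums hB]
    simp only [entriesW, prevI]
    norm_num
  | cons e rest =>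
    rw [hcs] at hHead hTail
    have hmemd : e ∈ (sIdx nums k).dropWhile (pvKeep nums k) := by
      rw [hcs]; exact List.mem_cons_self
    have hmem : e ∈ sIdx nums k := (List.dropWhile_sublist _).subset hmemd
    have hek : e < k := sIdx_lt nums k e hmem
    have hen : e < nums.length := by omega
    have hgek : pvg nums e < pvg nums k := kept_lt nums k e hmemd
    have hA : ∀ j, j ≤ e → pvmn nums j k = pvmn nums j e := fun j hj =>
      mn_stable nums hj (le_of_lt hek) (fun u hu1 hu2 => by
        rcases Nat.eq_or_lt_of_le hu2 with rfl | hu3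
        · exact hgek
        · exact sIdx_prop nums k e hmem u hu1 hu3)
    have hB : ∀ j, e < j → j ≤ k → pvmn nums j k = pvg nums k := fun j h1 h2 =>
      hHead j (by show e + 1 ≤ j; omega) h2
    have hsidx : sIdx nums (k + 1) = k :: e :: rest := by show k :: _ = _; rw [hcs]
    have hsubd : List.Sublist (e :: rest) (sIdx nums k) := by
      rw [← hcs]; exact List.dropWhile_sublist _
    have hpwd : (e :: rest).Pairwise (· > ·) := (sIdx_pairwise nums k).sublist hsubd
    have hsm1 : pvsm nums k - (wsumW nums (sIdx nums k) - wsumW nums (e :: rest))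
        = ∑ j ∈ Finset.range (e + 1), pvmn nums j k := by
      rw [sm_eq_wsumW, wsumW_eq nums k (e :: rest) hTail hpwd]
      show _ - (_ - ∑ j ∈ Finset.range (e + 1), pvmn nums j k) = _
      ring
    have hprefk : ((List.range nums.length).map (fun t => pvP nums (t + 1))).getD k 0
        = pvP nums (k + 1) := PySem.List.getD_map_range _ _ _ _ hk
    have hprefe : ((List.range nums.length).map (fun t => pvP nums (t + 1))).getD e 0
        = pvP nums (e + 1) := PySem.List.getD_map_range _ _ _ _ hen
    have hpsk : (arrOf (pvps nums) (k + 1) nums.length).getD k 0 = pvps nums k := by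
      rw [arrOf_getD (pvps nums) hk]; simp
    have hpse : (arrOf (pvps nums) (k + 1) nums.length).getD e 0 = pvps nums e := by
      rw [arrOf_getD (pvps nums) hen, if_pos (by omega)]
    have hdpe : (arrOf (pvdp nums) k nums.length).getD e 0 = pvdp nums e := by
      rw [arrOf_getD (pvdp nums) hen, if_pos hek]
    simp only [entriesW, hsm1, hprefk, hprefe, hpsk, hpse, hdpe]
    rw [← dp_step_pos nums hek hA hB, arrOf_set (pvdp nums) hk, hsidx,
      show pvans nums (k + 1) = pvans nums k + pvdp nums k from Finset.sum_range_succ _ _,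
      ← sm_step_pos nums hek hB]
    simp only [entriesW, prevI]

-- the main loop invariant for A
theorem loopA_eq (nums : List Int) : ∀ k, k ≤ nums.length →
    (List.range k).foldl (stepA nums ((List.range nums.length).map (fun t => pvP nums (t + 1))))
        ([], 0, List.replicate nums.length 0, List.replicate nums.length 0, 0) =
      (entriesW nums (sIdx nums k), pvsm nums k,
       arrOf (pvps nums) k nums.length, arrOf (pvdp nums) k nums.length, pvans nums k) := by
  intro k
  induction k with
  | zero =>
    intro _
    rw [List.range_zero, List.foldl_nil]
    have e1 : entriesW nums (sIdx nums 0) = [] := rfl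
    have e2 : pvsm nums 0 = 0 := rfl
    have e4 : pvans nums 0 = 0 := by simp [pvans]
    rw [e1, e2, e4, ← replicate_eq_arrOf (pvps nums), ← replicate_eq_arrOf (pvdp nums)]
  | succ m ih =>
    intro h
    rw [List.range_succ, List.foldl_append, ih (by omega), List.foldl_cons, List.foldl_nil,
      stepA_eq nums m (by omega)]

theorem totalStrength_eq (strength : List Int) :
    totalStrength strength = PySem.Int.mod (pvans strength strength.length) (10 ^ 9 + 7) := by
  unfold totalStrength
  show PySem.Int.mod ((List.range strength.length).foldl
      (stepA strength ((List.range strength.length).foldl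
        (fun pref i => pref ++ [pref.getLastD 0 + strength.getD i 0]) []))
      ([], 0, List.replicate strength.length 0, List.replicate strength.length 0, 0)).2.2.2.2
      (10 ^ 9 + 7) = _
  rw [pref_eq strength, loopA_eq strength strength.length (le_refl _)]

-- B's loops
theorem foldB (strength : List Int) : ∀ (m i t : Nat) (acc : Int), i ≤ t →
    (List.range' (t + 1) m).foldl
      (fun (st : Int × Int × Int) j =>
        let (total, curMin, curSum) := st
        let curMin := min curMin (strength.getD j 0)
        let curSum := curSum + strength.getD j 0
        (total + curMin * curSum, curMin, curSum))
      (acc, pvmn strength i t, pvP strength (t + 1) - pvP strength i) =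
    (acc + ∑ u ∈ Finset.Ico (t + 1) (t + 1 + m), pvmn strength i u * (pvP strength (u + 1) - pvP strength i),
     pvmn strength i (t + m), pvP strength (t + m + 1) - pvP strength i) := by
  intro m
  induction m with
  | zero =>
    intro i t acc hit
    simp
  | succ m ih =>
    intro i t acc hit
    rw [List.range'_succ, List.foldl_cons]
    have hmin : min (pvmn strength i t) (strength.getD (t + 1) 0) = pvmn strength i (t + 1) :=
      (mn_succ strength hit).symm
    have hsum : pvP strength (t + 1) - pvP strength i + strength.getD (t + 1) 0
        = pvP strength (t + 2) - pvP strength i := by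
      show pvP strength (t + 1) - pvP strength i + pvg strength (t + 1) = _
      have h2 : pvP strength (t + 2) = pvP strength (t + 1) + pvg strength (t + 1) := rfl
      rw [h2]; ring
    show (List.range' (t + 1 + 1) m).foldl _
        (acc + (pvmn strength i t ⊓ strength.getD (t + 1) 0) *
          (pvP strength (t + 1) - pvP strength i + strength.getD (t + 1) 0),
         pvmn strength i t ⊓ strength.getD (t + 1) 0,
         pvP strength (t + 1) - pvP strength i + strength.getD (t + 1) 0) = _
    rw [hmin, hsum]
    rw [ih i (t + 1) _ (by omega)]
    have e0 : t + 1 + 1 = t + 2 := by omega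
    have e2 : t + 1 + m = t + (m + 1) := by omega
    rw [e0, e2]
    have hbot : ∑ u ∈ Finset.Ico (t + 1) (t + 1 + (m + 1)),
        pvmn strength i u * (pvP strength (u + 1) - pvP strength i)
        = pvmn strength i (t + 1) * (pvP strength (t + 2) - pvP strength i)
          + ∑ u ∈ Finset.Ico (t + 2) (t + 1 + (m + 1)),
              pvmn strength i u * (pvP strength (u + 1) - pvP strength i) :=
      Finset.sum_eq_sum_Ico_succ_bot (by omega) _
    rw [hbot]
    refine Prod.ext ?_ rfl
    show _ = acc + _
    ring_nf

theorem innerB_eq (strength : List Int) {n i : Nat} (h : i < n) (total : Int) :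
    innerB strength n i total =
      total + ∑ t ∈ Finset.Ico i n, pvmn strength i t * (pvP strength (t + 1) - pvP strength i) := by
  unfold innerB
  have hn : n - i = (n - i - 1) + 1 := by omega
  rw [hn, List.range'_succ, List.foldl_cons]
  have hmin : min (strength.getD i 0) (strength.getD i 0) = pvmn strength i i := by
    rw [min_self]; exact (mn_self strength i).symm
  have hsum : (0 : Int) + strength.getD i 0 = pvP strength (i + 1) - pvP strength i := by
    show (0 : Int) + pvg strength i = _
    have h2 : pvP strength (i + 1) = pvP strength i + pvg strength i := rfl
    rw [h2]; ring
  show ((List.range' (i + 1) (n - i - 1)).foldl _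
      (total + min (strength.getD i 0) (strength.getD i 0) * ((0 : Int) + strength.getD i 0),
       min (strength.getD i 0) (strength.getD i 0), (0 : Int) + strength.getD i 0)).1 = _
  rw [hmin, hsum, foldB strength (n - i - 1) i i _ (le_refl i)]
  have he : i + 1 + (n - i - 1) = n := by omega
  rw [he]
  show total + _ + _ = _
  rw [Finset.sum_eq_sum_Ico_succ_bot (show i < n from h) (fun t => pvmn strength i t * (pvP strength (t + 1) - pvP strength i))]
  ring

theorem totalStrength_alt_eq (strength : List Int) :
    totalStrength_alt strength = PySem.Int.mod
      (∑ i ∈ Finset.range strength.length, ∑ t ∈ Finset.Ico i strength.length,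
        pvmn strength i t * (pvP strength (t + 1) - pvP strength i)) (10 ^ 9 + 7) := by
  unfold totalStrength_alt
  show PySem.Int.mod ((List.range strength.length).foldl
      (fun total i => innerB strength strength.length i total) 0) (10 ^ 9 + 7) = _
  congr 1
  have aux : ∀ k, k ≤ strength.length →
      (List.range k).foldl (fun total i => innerB strength strength.length i total) 0
        = ∑ i ∈ Finset.range k, ∑ t ∈ Finset.Ico i strength.length,
            pvmn strength i t * (pvP strength (t + 1) - pvP strength i) := by
    intro k
    induction k with
    | zero => intro _; simp
    | succ m ih =>
      intro hm
      rw [List.range_succ, List.foldl_append, List.foldl_cons, List.foldl_nil, ih (by omega),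
        innerB_eq strength (by omega : m < strength.length), Finset.sum_range_succ]
  exact aux strength.length (le_refl _)

theorem sum_transpose (f : Nat → Nat → Int) : ∀ n,
    ∑ t ∈ Finset.range n, ∑ j ∈ Finset.range (t + 1), f j t =
      ∑ i ∈ Finset.range n, ∑ t ∈ Finset.Ico i n, f i t := by
  intro n
  induction n with
  | zero => simp
  | succ n ih =>
    have h1 : ∑ i ∈ Finset.range n, ∑ t ∈ Finset.Ico i (n + 1), f i t
        = ∑ i ∈ Finset.range n, (∑ t ∈ Finset.Ico i n, f i t + f i n) :=
      Finset.sum_congr rfl (fun i hi => Finset.sum_Ico_succ_top (le_of_lt (Finset.mem_range.mp hi)) _)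
    have h2 : ∑ t ∈ Finset.Ico n (n + 1), f n t = f n n := by
      rw [Finset.sum_Ico_succ_top (le_refl n)]; simp
    rw [Finset.sum_range_succ, ih]
    conv_rhs => rw [Finset.sum_range_succ, h1, h2]
    rw [Finset.sum_add_distrib, Finset.sum_range_succ]
    ring

-- ===== VERDICT (by name: the statement is the Claim_ definition above) =====
theorem totalStrength_spec : Claim_equal_totalStrength := by
  intro strength _
  show totalStrength strength = totalStrength_alt strength
  rw [totalStrength_eq, totalStrength_alt_eq]
  congr 1
  rw [show pvans strength strength.length =
      ∑ t ∈ Finset.range strength.length, ∑ j ∈ Finset.range (t + 1),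
        pvmn strength j t * (pvP strength (t + 1) - pvP strength j) from rfl]
  exact sum_transpose (fun j t => pvmn strength j t * (pvP strength (t + 1) - pvP strength j)) _
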